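-- pv_equiv track=rewrite | github.com/nedbat/adventofcode2019 | day16.py | fft_one_out
-- ===== SOURCE A (Python) =====
-- import itertools
--
-- def base_pattern(n):
--     while True:
--         for val in [0, 1, 0, -1]:
--             yield from [val] * n
--
-- def repeating_pattern(n):
--     return itertools.islice(base_pattern(n), 1, None)
--
-- def fft_one_out(signal, i):
--     total = 0
--     for s, m in zip(signal, repeating_pattern(i)):
--         if m:
--             total += s * m
--     if total >= 0:
--         return total % 10
--     else:
--         return -(total % -10)
-- ===== SOURCE B (Python) =====
-- def fft_one_out(sig, i):
--     # Prefix-sum/block version: any pattern block sum is a difference of two prefix sums.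
--     n = len(sig)
--     if n == 0:
--         return 0
--     prefix = [0]
--     run = 0
--     for s in sig:
--         run += s
--         prefix.append(run)
--     total = 0
--     for t in range(n // (4 * i) + 1):
--         base = 4 * i * t
--         total += prefix[min(2 * i - 1 + base, n)] - prefix[min(i - 1 + base, n)]
--         total -= prefix[min(4 * i - 1 + base, n)] - prefix[min(3 * i - 1 + base, n)]
--     return abs(total) % 10
-- ===== Notes on version B (the rewrite author's own statement) =====
-- stated objective: alternative
-- what changed: B replaces A's element-wise zip against a lazily generated infinite pattern by a prefix-sum table plus a loop over the O(n/i) nonzero pattern blocks, each contributing one range sum; Pre_ excludes nonempty signals with i <= 0, on which A's pattern generator yields nothing and A loops forever.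
import Mathlib
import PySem

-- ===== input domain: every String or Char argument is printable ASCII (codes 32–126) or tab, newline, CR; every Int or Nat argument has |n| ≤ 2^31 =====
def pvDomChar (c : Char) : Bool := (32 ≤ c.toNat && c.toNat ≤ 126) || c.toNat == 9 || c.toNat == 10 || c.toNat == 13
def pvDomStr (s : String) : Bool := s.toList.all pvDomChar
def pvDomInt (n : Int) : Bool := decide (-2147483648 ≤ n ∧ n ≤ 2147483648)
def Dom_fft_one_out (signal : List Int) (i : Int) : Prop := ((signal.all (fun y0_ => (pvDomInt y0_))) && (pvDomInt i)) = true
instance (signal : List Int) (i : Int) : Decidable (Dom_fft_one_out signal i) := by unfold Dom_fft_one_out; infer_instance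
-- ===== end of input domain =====

-- B replaces the element-wise zip with a generated pattern by prefix sums plus a loop over
-- the nonzero pattern blocks (alternative decomposition; return value only).

-- ===== PORT A =====
-- base_pattern materialised to `fuel` cycles of [0]*n ++ [1]*n ++ [0]*n ++ [-1]*n;
-- zip with the finite signal only ever reads signal.length elements, and fuel = length+1
-- cycles is enough when i ≥ 1 (outside Pre_, Python's generator is empty and A hangs).
def pvCycles (n : Int) (fuel : Nat) : List Int :=
  match fuel with
  | 0 => []
  | f + 1 =>
      (List.replicate n.toNat 0 ++ List.replicate n.toNat 1 ++
       List.replicate n.toNat 0 ++ List.replicate n.toNat (-1)) ++ pvCycles n f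

def fft_one_out (signal : List Int) (i : Int) : Int :=
  -- repeating_pattern(i) = islice(base_pattern(i), 1, None)
  let pattern := (pvCycles i (signal.length + 1)).drop 1
  let total := (signal.zip pattern).foldl
      (fun total sm => if sm.2 ≠ 0 then total + sm.1 * sm.2 else total) 0
  if total ≥ 0 then PySem.Int.mod total 10 else -(PySem.Int.mod total (-10))

-- ===== PORT B =====
def fft_one_out_alt (signal : List Int) (i : Int) : Int :=
  let n : Int := signal.length
  if n = 0 then 0
  else
    let pfx := (signal.foldl (fun pr s => (pr.1 ++ [pr.2 + s], pr.2 + s)) ([0], 0)).1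
    let total := (PySem.List.pyRange 0 (PySem.Int.floordiv n (4 * i) + 1) 1).foldl
      (fun total t =>
        let base := 4 * i * t
        total
          + ((PySem.List.pyGet? pfx (min (2 * i - 1 + base) n)).getD 0
             - (PySem.List.pyGet? pfx (min (i - 1 + base) n)).getD 0)
          - ((PySem.List.pyGet? pfx (min (4 * i - 1 + base) n)).getD 0
             - (PySem.List.pyGet? pfx (min (3 * i - 1 + base) n)).getD 0)) 0
    PySem.Int.mod |total| 10

-- ===== PRECONDITION & SPEC =====
-- Pre_ excludes nonempty signals with i ≤ 0: there Python A's pattern generator yields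
-- nothing and the zip never terminates (A diverges, returning no value).
def Pre_fft_one_out (signal : List Int) (i : Int) : Prop := signal = [] ∨ 1 ≤ i
instance (signal : List Int) (i : Int) : Decidable (Pre_fft_one_out signal i) := by
  unfold Pre_fft_one_out; infer_instance

def pvWitness_fft_one_out : List Int × Int := ([1, 2, 3, 4, 5, 6, 7, 8], 2)

def Spec_fft_one_out (signal : List Int) (i : Int) (out : Int) : Prop := out = fft_one_out_alt signal i
instance (signal : List Int) (i : Int) (out : Int) : Decidable (Spec_fft_one_out signal i out) := by unfold Spec_fft_one_out; infer_instance

-- ===== CLAIM (what is proved, stated in full; the proofs are below) =====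
def Claim_equal_fft_one_out : Prop := ∀ (signal : List Int) (i : Int), Dom_fft_one_out signal i → Pre_fft_one_out signal i → Spec_fft_one_out signal i (fft_one_out signal i)


-- ===== LEMMAS AND PROOFS =====

-- A's fold step, shifted accumulator
lemma pvFoldl_acc (l : List (Int × Int)) (a : Int) :
    l.foldl (fun t sm => if sm.2 ≠ 0 then t + sm.1 * sm.2 else t) a
      = a + l.foldl (fun t sm => if sm.2 ≠ 0 then t + sm.1 * sm.2 else t) 0 := by
  induction l generalizing a with
  | nil => simp
  | cons x xs ih =>
      rw [List.foldl_cons, List.foldl_cons, ih, ih (if x.2 ≠ 0 then 0 + x.1 * x.2 else 0)]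
      split_ifs <;> ring

lemma pvZip_append (s p1 p2 : List Int) :
    s.zip (p1 ++ p2) = (s.take p1.length).zip p1 ++ (s.drop p1.length).zip p2 := by
  induction p1 generalizing s with
  | nil => simp
  | cons x xs ih =>
      cases s with
      | nil => simp
      | cons y ys => simp [ih]

lemma pvDot_rep0 (m : Nat) (s : List Int) (a : Int) :
    (s.zip (List.replicate m (0:Int))).foldl (fun t sm => if sm.2 ≠ 0 then t + sm.1 * sm.2 else t) a = a := by
  induction m generalizing s a with
  | zero => simp
  | succ k ih =>
      cases s with
      | nil => simp
      | cons y ys =>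
          rw [List.replicate_succ, List.zip_cons_cons, List.foldl_cons]
          rw [show (if ((0:Int) ≠ 0) then a + y * 0 else a) = a by norm_num, ih]

lemma pvDot_rep1 (m : Nat) (s : List Int) (a : Int) :
    (s.zip (List.replicate m (1:Int))).foldl (fun t sm => if sm.2 ≠ 0 then t + sm.1 * sm.2 else t) a
      = a + (s.take m).sum := by
  induction m generalizing s a with
  | zero => simp
  | succ k ih =>
      cases s with
      | nil => simp
      | cons y ys =>
          rw [List.replicate_succ, List.zip_cons_cons, List.foldl_cons]
          rw [show (if ((1:Int) ≠ 0) then a + y * 1 else a) = a + y by norm_num, ih]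
          simp [List.take_succ_cons]
          ring

lemma pvDot_repm1 (m : Nat) (s : List Int) (a : Int) :
    (s.zip (List.replicate m (-1:Int))).foldl (fun t sm => if sm.2 ≠ 0 then t + sm.1 * sm.2 else t) a
      = a - (s.take m).sum := by
  induction m generalizing s a with
  | zero => simp
  | succ k ih =>
      cases s with
      | nil => simp
      | cons y ys =>
          rw [List.replicate_succ, List.zip_cons_cons, List.foldl_cons]
          rw [show (if ((-1:Int) ≠ 0) then a + y * (-1) else a) = a - y by rw [if_pos (by norm_num)]; ring, ih]
          simp [List.take_succ_cons]
          ring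

-- split one replicate block off the pattern
lemma pvSplit_rep (s : List Int) (m : Nat) (v : Int) (p : List Int) (a : Int) :
    (s.zip (List.replicate m v ++ p)).foldl (fun t sm => if sm.2 ≠ 0 then t + sm.1 * sm.2 else t) a
      = ((s.take m).zip (List.replicate m v)).foldl (fun t sm => if sm.2 ≠ 0 then t + sm.1 * sm.2 else t) a
        + ((s.drop m).zip p).foldl (fun t sm => if sm.2 ≠ 0 then t + sm.1 * sm.2 else t) 0 := by
  rw [pvZip_append]
  simp only [List.length_replicate]
  rw [List.foldl_append, pvFoldl_acc]

-- one pattern chunk 0^a 1^b 0^c (-1)^d followed by an arbitrary pattern tail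
lemma pvDot_chunk (s : List Int) (a b c d : Nat) (p : List Int) (acc : Int) :
    (s.zip (List.replicate a (0:Int) ++ (List.replicate b 1 ++ (List.replicate c 0 ++ (List.replicate d (-1) ++ p))))).foldl
        (fun t sm => if sm.2 ≠ 0 then t + sm.1 * sm.2 else t) acc
      = acc + ((s.drop a).take b).sum - ((s.drop (a + b + c)).take d).sum
        + ((s.drop (a + b + c + d)).zip p).foldl (fun t sm => if sm.2 ≠ 0 then t + sm.1 * sm.2 else t) 0 := by
  rw [pvSplit_rep, pvDot_rep0, pvSplit_rep, pvDot_rep1, pvSplit_rep, pvDot_rep0, pvSplit_rep, pvDot_repm1]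
  simp only [List.take_take, min_self, List.drop_drop]
  ring

lemma pvDot_cycles (i : Int) (f : Nat) (s : List Int) :
    (s.zip (pvCycles i f)).foldl (fun t sm => if sm.2 ≠ 0 then t + sm.1 * sm.2 else t) 0
      = ∑ t ∈ Finset.range f,
          (((s.drop (i.toNat + 4 * i.toNat * t)).take i.toNat).sum
            - ((s.drop (3 * i.toNat + 4 * i.toNat * t)).take i.toNat).sum) := by
  induction f generalizing s with
  | zero => simp [pvCycles]
  | succ k ih =>
      rw [show pvCycles i (k+1)
          = List.replicate i.toNat (0:Int) ++ (List.replicate i.toNat 1 ++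
            (List.replicate i.toNat 0 ++ (List.replicate i.toNat (-1) ++ pvCycles i k))) by
        simp [pvCycles, List.append_assoc]]
      rw [pvDot_chunk, ih, Finset.sum_range_succ']
      have hsum : ∀ t ∈ Finset.range k,
          (((s.drop (i.toNat + i.toNat + i.toNat + i.toNat)).drop (i.toNat + 4 * i.toNat * t)).take i.toNat).sum
            - (((s.drop (i.toNat + i.toNat + i.toNat + i.toNat)).drop (3 * i.toNat + 4 * i.toNat * t)).take i.toNat).sum
          = ((s.drop (i.toNat + 4 * i.toNat * (t + 1))).take i.toNat).sum
            - ((s.drop (3 * i.toNat + 4 * i.toNat * (t + 1))).take i.toNat).sum := by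
        intro t _
        rw [List.drop_drop, List.drop_drop]
        have e1 : i.toNat + i.toNat + i.toNat + i.toNat + (i.toNat + 4 * i.toNat * t)
            = i.toNat + 4 * i.toNat * (t + 1) := by ring
        have e2 : i.toNat + i.toNat + i.toNat + i.toNat + (3 * i.toNat + 4 * i.toNat * t)
            = 3 * i.toNat + 4 * i.toNat * (t + 1) := by ring
        rw [e1, e2]
      rw [Finset.sum_congr rfl hsum]
      have e3 : i.toNat + i.toNat + i.toNat = 3 * i.toNat := by ring
      have e4 : i.toNat + 4 * i.toNat * 0 = i.toNat := by ring
      have e5 : (3:Nat) * i.toNat + 4 * i.toNat * 0 = 3 * i.toNat := by ring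
      rw [e3, e4, e5]
      ring

-- the per-block contribution: sum of the +1 block minus sum of the -1 block
def pvF (s : List Int) (N t : Nat) : Int :=
  ((s.drop (N - 1 + 4 * N * t)).take N).sum - ((s.drop (3 * N - 1 + 4 * N * t)).take N).sum

-- A's whole accumulated total, as a sum of per-block contributions
lemma pvA_total (s : List Int) (i : Int) (hi : 1 ≤ i) :
    (s.zip ((pvCycles i (s.length + 1)).drop 1)).foldl
        (fun t sm => if sm.2 ≠ 0 then t + sm.1 * sm.2 else t) 0
      = ∑ t ∈ Finset.range (s.length + 1), pvF s i.toNat t := by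
  obtain ⟨M, hM⟩ : ∃ M, i.toNat = M + 1 := ⟨i.toNat - 1, by omega⟩
  rw [show pvCycles i (s.length + 1)
      = (List.replicate i.toNat (0:Int) ++ List.replicate i.toNat 1 ++
         List.replicate i.toNat 0 ++ List.replicate i.toNat (-1)) ++ pvCycles i s.length from rfl]
  rw [hM]
  nth_rewrite 1 [show List.replicate (M + 1) (0:Int) = 0 :: List.replicate M 0 from rfl]
  simp only [List.cons_append, List.drop_succ_cons, List.drop_zero]
  rw [show (List.replicate M (0:Int) ++ List.replicate (M+1) 1 ++ List.replicate (M+1) 0 ++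
        List.replicate (M+1) (-1)) ++ pvCycles i s.length
      = List.replicate M (0:Int) ++ (List.replicate (M+1) 1 ++
        (List.replicate (M+1) 0 ++ (List.replicate (M+1) (-1) ++ pvCycles i s.length))) by
    simp [List.append_assoc]]
  rw [pvDot_chunk, pvDot_cycles, hM, Finset.sum_range_succ']
  have hsum : ∀ t ∈ Finset.range s.length,
      ((((s.drop (M + (M+1) + (M+1) + (M+1))).drop ((M+1) + 4 * (M+1) * t)).take (M+1)).sum
        - (((s.drop (M + (M+1) + (M+1) + (M+1))).drop (3 * (M+1) + 4 * (M+1) * t)).take (M+1)).sum)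
      = pvF s (M+1) (t + 1) := by
    intro t _
    rw [List.drop_drop, List.drop_drop]
    unfold pvF
    have e1 : M + (M+1) + (M+1) + (M+1) + ((M+1) + 4 * (M+1) * t) = (M+1) - 1 + 4 * (M+1) * (t+1) := by
      simp only [Nat.add_sub_cancel]; ring
    have e2 : M + (M+1) + (M+1) + (M+1) + (3 * (M+1) + 4 * (M+1) * t) = 3 * (M+1) - 1 + 4 * (M+1) * (t+1) := by
      have : 3 * (M+1) - 1 = 3 * M + 2 := by omega
      rw [this]; ring
    rw [e1, e2]
  rw [Finset.sum_congr rfl hsum]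
  unfold pvF
  have e3 : (M+1) - 1 + 4 * (M+1) * 0 = M := by omega
  have e4 : 3 * (M+1) - 1 + 4 * (M+1) * 0 = M + (M+1) + (M+1) := by omega
  rw [e3, e4]
  ring

-- ===== B-side: prefix sums =====

def pvPsum (r : Int) : List Int → List Int
  | [] => []
  | x :: xs => (r + x) :: pvPsum (r + x) xs

lemma pvPfx_inv (s : List Int) (p : List Int) (r : Int) :
    s.foldl (fun pr x => (pr.1 ++ [pr.2 + x], pr.2 + x)) (p, r) = (p ++ pvPsum r s, r + s.sum) := by
  induction s generalizing p r with
  | nil => simp [pvPsum]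
  | cons x xs ih =>
      rw [List.foldl_cons, ih]
      simp [pvPsum, List.append_assoc]
      ring

lemma pvPsum_get (s : List Int) (r : Int) (j : Nat) (hj : j < s.length) :
    (pvPsum r s)[j]? = some (r + (s.take (j + 1)).sum) := by
  induction s generalizing r j with
  | nil => simp at hj
  | cons x xs ih =>
      cases j with
      | zero => simp [pvPsum]
      | succ k =>
          simp only [pvPsum, List.getElem?_cons_succ]
          rw [ih (r + x) k (by simpa using hj)]
          simp [List.take_succ_cons]
          ring

lemma pvPfx_get (s : List Int) (j : Nat) (hj : j ≤ s.length) :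
    (PySem.List.pyGet? ((0:Int) :: pvPsum 0 s) (j : Int)).getD 0 = (s.take j).sum := by
  rw [PySem.List.pyGet?_natCast]
  cases j with
  | zero => simp
  | succ k =>
      simp only [List.getElem?_cons_succ]
      rw [pvPsum_get s 0 k (by omega)]
      simp

lemma pvTake_min_sum (s : List Int) (m : Nat) :
    (s.take (min m s.length)).sum = (s.take m).sum := by
  rcases le_total m s.length with h | h
  · rw [min_eq_left h]
  · rw [min_eq_right h, List.take_length, List.take_of_length_le h]

lemma pvTake_diff (s : List Int) (a m : Nat) :
    (s.take (a + m)).sum - (s.take a).sum = ((s.drop a).take m).sum := by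
  rw [List.take_add, List.sum_append]
  ring

lemma pvFoldl_sum {α : Type} (l : List α) (f : Int → α → Int)
    (h : ∀ a x, f a x = a + f 0 x) (a : Int) :
    l.foldl f a = a + (l.map (f 0)).sum := by
  induction l generalizing a with
  | nil => simp
  | cons x xs ih => rw [List.foldl_cons, ih, h]; simp [List.map_cons]; ring

lemma pvList_sum_range (n : Nat) (g : Nat → Int) :
    ((List.range n).map g).sum = ∑ t ∈ Finset.range n, g t := by
  induction n with
  | zero => simp
  | succ k ih => rw [List.range_succ, Finset.sum_range_succ]; simp [ih]

lemma pvP_min (s : List Int) (X : Int) (hX : 0 ≤ X) :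
    (PySem.List.pyGet? ((0:Int) :: pvPsum 0 s) (min X (s.length : Int))).getD 0
      = (s.take X.toNat).sum := by
  have hj : min X (s.length : Int) = ((min X.toNat s.length : Nat) : Int) := by omega
  rw [hj, pvPfx_get s _ (by omega), pvTake_min_sum]

-- Python's sign-split mod equals mod of the absolute value
lemma pvMod_abs (z : Int) :
    (if z ≥ 0 then PySem.Int.mod z 10 else -(PySem.Int.mod z (-10))) = PySem.Int.mod |z| 10 := by
  split_ifs with h
  · rw [abs_of_nonneg h]
  · have h1 := PySem.Int.floordiv_mul_add_mod z (-10)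
    have h2 := PySem.Int.floordiv_mul_add_mod (-z) 10
    have h3 := PySem.Int.mod_neg_bounds z (show (-10:Int) < 0 by norm_num)
    have h4 := PySem.Int.mod_nonneg (-z) (show (0:Int) < 10 by norm_num)
    have h5 := PySem.Int.mod_lt (-z) (show (0:Int) < 10 by norm_num)
    rw [abs_of_neg (by omega)]
    omega

-- B's total, as the same sum of per-block contributions (over its own block range)
lemma pvB_total (s : List Int) (i : Int) (hi : 1 ≤ i) (hs : s ≠ []) :
    fft_one_out_alt s i
      = PySem.Int.mod |∑ t ∈ Finset.range (s.length / (4 * i.toNat) + 1), pvF s i.toNat t| 10 := by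
  obtain ⟨M, hM⟩ : ∃ M, i.toNat = M + 1 := ⟨i.toNat - 1, by omega⟩
  have hi' : i = ((M + 1 : Nat) : Int) := by omega
  subst hi'
  simp only [Int.toNat_natCast] at *
  have hlen0 : s.length ≠ 0 := by simpa using hs
  have hlen : ((s.length : Int)) ≠ 0 := by exact_mod_cast hlen0
  unfold fft_one_out_alt
  dsimp only
  rw [if_neg hlen]
  rw [show (s.foldl (fun pr x => (pr.1 ++ [pr.2 + x], pr.2 + x)) (([0], 0) : List Int × Int)).1
      = (0:Int) :: pvPsum 0 s by rw [pvPfx_inv]; rfl]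
  have hK : PySem.Int.floordiv ((s.length : Int)) (4 * ((M + 1 : Nat) : Int)) + 1
      = ((s.length / (4 * (M + 1)) + 1 : Nat) : Int) := by
    rw [show (4 * ((M + 1 : Nat) : Int)) = ((4 * (M + 1) : Nat) : Int) by push_cast; ring,
        PySem.Int.floordiv_natCast]
    push_cast
    ring
  rw [hK, PySem.List.pyRange_one]
  rw [show (((s.length / (4 * (M + 1)) + 1 : Nat) : Int) - 0).toNat = s.length / (4 * (M + 1)) + 1
      by rw [sub_zero, Int.toNat_natCast]]
  rw [List.foldl_map, pvFoldl_sum _ _ (by intro a x; ring), pvList_sum_range]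
  rw [zero_add]
  congr 2
  apply Finset.sum_congr rfl
  intro k _
  simp only [zero_add]
  have e1 : 2 * ((M + 1 : Nat) : Int) - 1 + 4 * ((M + 1 : Nat) : Int) * (k : Int)
      = ((2 * M + 1 + 4 * (M + 1) * k : Nat) : Int) := by push_cast; ring
  have e2 : ((M + 1 : Nat) : Int) - 1 + 4 * ((M + 1 : Nat) : Int) * (k : Int)
      = ((M + 4 * (M + 1) * k : Nat) : Int) := by push_cast; ring
  have e3 : 4 * ((M + 1 : Nat) : Int) - 1 + 4 * ((M + 1 : Nat) : Int) * (k : Int)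
      = ((4 * M + 3 + 4 * (M + 1) * k : Nat) : Int) := by push_cast; ring
  have e4 : 3 * ((M + 1 : Nat) : Int) - 1 + 4 * ((M + 1 : Nat) : Int) * (k : Int)
      = ((3 * M + 2 + 4 * (M + 1) * k : Nat) : Int) := by push_cast; ring
  rw [e1, e2, e3, e4,
      pvP_min s _ (Int.natCast_nonneg _), pvP_min s _ (Int.natCast_nonneg _),
      pvP_min s _ (Int.natCast_nonneg _), pvP_min s _ (Int.natCast_nonneg _)]
  simp only [Int.toNat_natCast]
  rw [show 2 * M + 1 + 4 * (M + 1) * k = (M + 4 * (M + 1) * k) + (M + 1) by ring,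
      show 4 * M + 3 + 4 * (M + 1) * k = (3 * M + 2 + 4 * (M + 1) * k) + (M + 1) by ring,
      pvTake_diff, pvTake_diff]
  unfold pvF
  rw [show (M + 1) - 1 + 4 * (M + 1) * k = M + 4 * (M + 1) * k by omega,
      show 3 * (M + 1) - 1 + 4 * (M + 1) * k = 3 * M + 2 + 4 * (M + 1) * k by omega]

-- the two block ranges agree: beyond B's range every block is empty
lemma pvSum_ext (s : List Int) (N : Nat) (hN : 1 ≤ N) :
    ∑ t ∈ Finset.range (s.length / (4 * N) + 1), pvF s N t
      = ∑ t ∈ Finset.range (s.length + 1), pvF s N t := by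
  apply Finset.sum_subset
  · intro x hx
    rw [Finset.mem_range] at hx ⊢
    exact lt_of_lt_of_le hx (Nat.succ_le_succ (Nat.div_le_self _ _))
  · intro t _ ht
    have ht' : s.length / (4 * N) + 1 ≤ t := by
      simp only [Finset.mem_range, not_lt] at ht
      exact ht
    have hlt : s.length < 4 * N * (s.length / (4 * N)) + 4 * N := by
      have h1 := Nat.div_add_mod s.length (4 * N)
      have h2 := Nat.mod_lt s.length (show 0 < 4 * N by omega)
      omega
    have hle : 4 * N * (s.length / (4 * N) + 1) ≤ 4 * N * t := Nat.mul_le_mul_left _ ht'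
    have hbig : s.length < 4 * N * t := by
      have : 4 * N * (s.length / (4 * N) + 1) = 4 * N * (s.length / (4 * N)) + 4 * N := by ring
      omega
    unfold pvF
    have g1 : s.length ≤ N - 1 + 4 * N * t := le_trans hbig.le (Nat.le_add_left _ _)
    have g2 : s.length ≤ 3 * N - 1 + 4 * N * t := le_trans hbig.le (Nat.le_add_left _ _)
    rw [List.drop_eq_nil_of_le g1, List.drop_eq_nil_of_le g2]
    simp

-- ===== VERDICT (by name: the statement is the Claim_ definition above) =====
theorem fft_one_out_spec : Claim_equal_fft_one_out := by
  intro signal i _ hpre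
  unfold Spec_fft_one_out
  rcases eq_or_ne signal [] with rfl | hs
  · simp [fft_one_out, fft_one_out_alt]
  · have hi : 1 ≤ i := by
      rcases hpre with h | h
      · exact absurd h hs
      · exact h
    rw [show fft_one_out signal i
        = (if ((signal.zip ((pvCycles i (signal.length + 1)).drop 1)).foldl
              (fun t sm => if sm.2 ≠ 0 then t + sm.1 * sm.2 else t) 0) ≥ 0
           then PySem.Int.mod ((signal.zip ((pvCycles i (signal.length + 1)).drop 1)).foldl
              (fun t sm => if sm.2 ≠ 0 then t + sm.1 * sm.2 else t) 0) 10
           else -(PySem.Int.mod ((signal.zip ((pvCycles i (signal.length + 1)).drop 1)).foldl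
              (fun t sm => if sm.2 ≠ 0 then t + sm.1 * sm.2 else t) 0) (-10))) from rfl]
    rw [pvMod_abs, pvA_total signal i hi, pvB_total signal i hi hs,
        pvSum_ext signal i.toNat (by omega)]
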